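-- pv_equiv track=rewrite | github.com/harshal-509/Leetcode-Problems | Check if it is possible to survive on Island - GFG/check-if-it-is-possible-to-survive-on-island.py | minimumDays
-- ===== SOURCE A (Python) =====
-- def minimumDays(S, N, M):
--     # code here
--     if(N<M):
--         return -1
--     mindays=0
--     currfood=0
--     day=1
--     while(day<=S):
--         if(currfood<M):
--             if(day%7==0):
--                 if(mindays==day-1):
--                     return -1
--             mindays+=1
--             currfood+=N
--         currfood-=M
--         day+=1
--     return mindays
-- ===== SOURCE B (Python) =====
-- def minimumDays(S, N, M):
--     if N < M:
--         return -1
--     if S <= 0 or M <= 0: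
--         return 0
--     if S >= 7 and 6 * N < 7 * M:
--         return -1
--     return -(-S * M // N)
-- ===== Notes on version B (the rewrite author's own statement) =====
-- stated objective: faster
-- what changed: Replaced the day-by-day greedy simulation loop with a closed-form answer: infeasible iff N<M or (S>=7 and 6*N<7*M), otherwise ceil(S*M/N) purchases.
import Mathlib
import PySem

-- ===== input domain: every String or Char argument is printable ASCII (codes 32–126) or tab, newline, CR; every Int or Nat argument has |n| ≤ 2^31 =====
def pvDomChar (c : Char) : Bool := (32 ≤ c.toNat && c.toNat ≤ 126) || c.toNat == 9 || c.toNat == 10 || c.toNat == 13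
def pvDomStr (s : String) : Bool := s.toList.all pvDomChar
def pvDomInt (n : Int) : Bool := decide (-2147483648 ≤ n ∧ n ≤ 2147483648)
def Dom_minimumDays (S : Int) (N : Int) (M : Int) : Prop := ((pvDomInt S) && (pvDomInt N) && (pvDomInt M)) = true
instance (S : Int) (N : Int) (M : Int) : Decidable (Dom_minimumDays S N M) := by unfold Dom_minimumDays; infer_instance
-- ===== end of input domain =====

-- B replaces A's day-by-day O(S) simulation by an O(1) closed form: feasibility check
-- (6*N < 7*M with S ≥ 7 means the first "Sunday" is unsurvivable) and ceil(S*M/N) purchases.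


-- ===== PORT A =====
-- A's while loop; fuel = number of remaining iterations (the loop runs for day = 1..S)
def pvLoopA (N M : Int) : Nat → Int → Int → Int → Int
  | 0, _, mindays, _ => mindays
  | fuel+1, day, mindays, currfood =>
    if currfood < M then
      if PySem.Int.mod day 7 = 0 then
        if mindays = day - 1 then -1
        else pvLoopA N M fuel (day+1) (mindays+1) (currfood + N - M)
      else pvLoopA N M fuel (day+1) (mindays+1) (currfood + N - M)
    else pvLoopA N M fuel (day+1) mindays (currfood - M)

def minimumDays (S : Int) (N : Int) (M : Int) : Int :=
  if N < M then -1
  else pvLoopA N M S.toNat 1 0 0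

-- ===== PORT B =====
def minimumDays_alt (S : Int) (N : Int) (M : Int) : Int :=
  if N < M then -1
  else if S ≤ 0 ∨ M ≤ 0 then 0
  else if 7 ≤ S ∧ 6 * N < 7 * M then -1
  else -(PySem.Int.floordiv (-(S * M)) N)

-- ===== PRECONDITION & SPEC =====
def Spec_minimumDays (S : Int) (N : Int) (M : Int) (out : Int) : Prop := out = minimumDays_alt S N M
instance (S : Int) (N : Int) (M : Int) (out : Int) : Decidable (Spec_minimumDays S N M out) := by unfold Spec_minimumDays; infer_instance

-- ===== CLAIM (what is proved, stated in full; the proofs are below) =====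
def Claim_equal_minimumDays : Prop := ∀ (S : Int) (N : Int) (M : Int), Dom_minimumDays S N M → Spec_minimumDays S N M (minimumDays S N M)

-- ===== LEMMAS AND PROOFS =====

-- When the eaten amount M is ≤ 0, the stock never drops below M, so no purchase ever happens.
theorem pvLoopA_no_eat (N M : Int) (hM : M ≤ 0) :
    ∀ (fuel : Nat) (day m c : Int), 0 ≤ c → pvLoopA N M fuel day m c = m := by
  intro fuel
  induction fuel with
  | zero => intro day m c _; rfl
  | succ f ih =>
    intro day m c hc
    have hlt : ¬ c < M := by omega
    simp only [pvLoopA, if_neg hlt]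
    exact ih (day+1) m (c - M) (by omega)

-- Greedy invariant: entering day `day` with m purchases so far and stock m*N - (day-1)*M,
-- where m = ceil((day-1)*M/N) (characterised by the two bracket inequalities); if either no
-- Sunday is reached or the week is survivable, the run ends with ceil((day-1+fuel)*M/N).
theorem pvLoopA_run (N M : Int) (hM : 1 ≤ M) (hMN : M ≤ N) :
    ∀ (fuel : Nat) (day m : Int), 1 ≤ day →
      (m - 1) * N < (day - 1) * M → (day - 1) * M ≤ m * N →
      ((day - 1 + fuel ≤ 6) ∨ 7 * M ≤ 6 * N) →
      ∃ k, pvLoopA N M fuel day m (m * N - (day - 1) * M) = k ∧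
        (k - 1) * N < (day - 1 + fuel) * M ∧ (day - 1 + fuel) * M ≤ k * N := by
  intro fuel
  induction fuel with
  | zero =>
    intro day m hd h1 h2 _
    exact ⟨m, rfl, by simpa using h1, by simpa using h2⟩
  | succ f ih =>
    intro day m hd h1 h2 hH
    have hN : 1 ≤ N := le_trans hM hMN
    by_cases hc : m * N - (day - 1) * M < M
    · -- buy today
      have hbuy : m * N < day * M := by nlinarith
      have hfail : ¬ (PySem.Int.mod day 7 = 0 ∧ m = day - 1) := by
        rintro ⟨h7, hm⟩
        rw [PySem.Int.mod_eq_zero_iff_dvd] at h7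
        have hd7 : 7 ≤ day := by omega
        rcases hH with hH | hH
        · omega
        · -- (day-1)*N < day*M and 7*M ≤ 6*N force day < 7
          have h1' : (day - 1) * N < day * M := by rw [hm] at hbuy; exact hbuy
          nlinarith
      have step : pvLoopA N M (f+1) day m (m * N - (day - 1) * M)
          = pvLoopA N M f (day+1) (m+1) (m * N - (day - 1) * M + N - M) := by
        by_cases h7 : PySem.Int.mod day 7 = 0
        · have hm : ¬ m = day - 1 := fun h => hfail ⟨h7, h⟩
          simp only [pvLoopA, if_pos hc, if_pos h7, if_neg hm]
        · simp only [pvLoopA, if_pos hc, if_neg h7]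
      have harg : m * N - (day - 1) * M + N - M = (m+1) * N - ((day+1) - 1) * M := by ring
      obtain ⟨k, hk, hk1, hk2⟩ := ih (day+1) (m+1) (by omega)
        (by nlinarith) (by nlinarith)
        (by rcases hH with hH | hH
            · left; push_cast at hH ⊢; omega
            · right; exact hH)
      have hcast : day + 1 - 1 + (f:Int) = day - 1 + ((f:Nat)+1:Nat) := by push_cast; ring
      refine ⟨k, ?_, ?_, ?_⟩
      · rw [step, harg]; exact hk
      · rwa [hcast] at hk1
      · rwa [hcast] at hk2
    · -- enough food, no purchase
      have step : pvLoopA N M (f+1) day m (m * N - (day - 1) * M)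
          = pvLoopA N M f (day+1) m (m * N - (day - 1) * M - M) := by
        simp only [pvLoopA, if_neg hc]
      have harg : m * N - (day - 1) * M - M = m * N - ((day+1) - 1) * M := by ring
      obtain ⟨k, hk, hk1, hk2⟩ := ih (day+1) m (by omega)
        (by nlinarith) (by nlinarith)
        (by rcases hH with hH | hH
            · left; push_cast at hH ⊢; omega
            · right; exact hH)
      have hcast : day + 1 - 1 + (f:Int) = day - 1 + ((f:Nat)+1:Nat) := by push_cast; ring
      refine ⟨k, ?_, ?_, ?_⟩
      · rw [step, harg]; exact hk
      · rwa [hcast] at hk1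
      · rwa [hcast] at hk2

-- Infeasible case: with M ≤ N and 6*N < 7*M the island buys on every one of days 1..6 and
-- still lacks food on day 7 (day%7==0, mindays==6), so A returns -1.
theorem pvLoopA_fail (N M : Int) (g : Nat) (hM : 1 ≤ M) (hMN : M ≤ N) (hinf : 6 * N < 7 * M) :
    pvLoopA N M (g+7) 1 0 0 = -1 := by
  have hstep : ∀ (fu : Nat) (day m c : Int), c < M → ¬ PySem.Int.mod day 7 = 0 →
      pvLoopA N M (fu+1) day m c = pvLoopA N M fu (day+1) (m+1) (c + N - M) := by
    intro fu day m c hc h7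
    simp only [pvLoopA, if_pos hc, if_neg h7]
  have hfin : ∀ (fu : Nat) (day m c : Int), c < M → PySem.Int.mod day 7 = 0 → m = day - 1 →
      pvLoopA N M (fu+1) day m c = -1 := by
    intro fu day m c hc h7 hm
    simp only [pvLoopA, if_pos hc, if_pos h7, if_pos hm]
  rw [show g+7 = (g+6)+1 from rfl, hstep _ 1 0 0 (by omega) (by decide)]
  rw [show g+6 = (g+5)+1 from rfl, hstep _ (1+1) (0+1) _ (by omega) (by decide)]
  rw [show g+5 = (g+4)+1 from rfl, hstep _ (1+1+1) (0+1+1) _ (by omega) (by decide)]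
  rw [show g+4 = (g+3)+1 from rfl, hstep _ (1+1+1+1) (0+1+1+1) _ (by omega) (by decide)]
  rw [show g+3 = (g+2)+1 from rfl, hstep _ (1+1+1+1+1) (0+1+1+1+1) _ (by omega) (by decide)]
  rw [show g+2 = (g+1)+1 from rfl, hstep _ (1+1+1+1+1+1) (0+1+1+1+1+1) _ (by omega) (by decide)]
  exact hfin g _ _ _ (by omega) (by decide) (by norm_num)

-- ===== VERDICT (by name: the statement is the Claim_ definition above) =====
theorem minimumDays_spec : Claim_equal_minimumDays := by
  intro S N M _
  unfold Spec_minimumDays minimumDays minimumDays_alt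
  by_cases hNM : N < M
  · simp [hNM]
  · simp only [if_neg hNM]
    by_cases hS : S ≤ 0
    · have : S.toNat = 0 := by omega
      simp [this, pvLoopA, hS]
    · by_cases hM : M ≤ 0
      · rw [pvLoopA_no_eat N M hM S.toNat 1 0 0 le_rfl]
        simp [hM]
      · have hMN : M ≤ N := by omega
        by_cases hbad : 7 ≤ S ∧ 6 * N < 7 * M
        · have h7 : S.toNat = (S.toNat - 7) + 7 := by omega
          rw [h7, pvLoopA_fail N M _ (by omega) hMN hbad.2,
            if_neg (by omega : ¬ (S ≤ 0 ∨ M ≤ 0)), if_pos hbad]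
        · have hH : (1 - 1 + (S.toNat:Nat) ≤ (6:Int)) ∨ 7 * M ≤ 6 * N := by
            rcases not_and_or.mp hbad with h | h
            · left; push_cast; omega
            · right; omega
          obtain ⟨k, hk, hk1, hk2⟩ :=
            pvLoopA_run N M (by omega) hMN S.toNat 1 0 le_rfl
              (by nlinarith) (by nlinarith) hH
          rw [show (0:Int) * N - (1 - 1) * M = 0 by ring] at hk
          have hScast : (1:Int) - 1 + (S.toNat:Int) = S := by omega
          rw [hScast] at hk1 hk2
          rw [hk, if_neg (by omega : ¬ (S ≤ 0 ∨ M ≤ 0)), if_neg hbad]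
          symm
          rw [PySem.Int.neg_floordiv_neg_eq_iff_of_pos (by omega)]
          exact ⟨hk1, hk2⟩
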